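-- pv_equiv track=rewrite | github.com/Kyuber1007/problemsolving | codesignal/arrayChange.py | solution
-- ===== SOURCE A (Python) =====
-- def solution(inputArray):
--     number = 0
--     for i in range(len(inputArray)-1):
--         tem1 = inputArray[i] + 1
--         tem2 = inputArray[i+1]
--         if tem2 < tem1:
--            number += tem1 - tem2
--            inputArray[i + 1] = tem1
--     return number
-- ===== SOURCE B (Python) =====
-- def solution(inputArray):
--     # Divide-and-conquer prefix-maximum scan over the shifted values x_i - i,
--     # then one arithmetic pass; performs the same in-place updates as the
--     # original (positions 1..n-1 are set to their final values).
--     def scan(vs):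
--         # prefix maxima of vs, computed by splitting in half and merging
--         if len(vs) <= 1:
--             return list(vs)
--         mid = len(vs) // 2
--         left = scan(vs[:mid])
--         right = scan(vs[mid:])
--         t = left[-1]
--         return left + [t if t > r else r for r in right]
--     if not inputArray:
--         return 0
--     p = scan([x - i for i, x in enumerate(inputArray)])
--     total = 0
--     for i in range(1, len(inputArray)):
--         total += i + p[i] - inputArray[i]
--         inputArray[i] = i + p[i]
--     return total
-- ===== Notes on version B (the rewrite author's own statement) =====
-- stated objective: alternative
-- what changed: B replaces A's sequential cascade on the mutated array by a divide-and-conquer prefix-maximum scan of the shifted values x_i - i (split in half, scan each half, merge by maxing the right half with the left half's last record), followed by a separate arithmetic pass that sums and writes the targets i + p_i.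
import Mathlib
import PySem

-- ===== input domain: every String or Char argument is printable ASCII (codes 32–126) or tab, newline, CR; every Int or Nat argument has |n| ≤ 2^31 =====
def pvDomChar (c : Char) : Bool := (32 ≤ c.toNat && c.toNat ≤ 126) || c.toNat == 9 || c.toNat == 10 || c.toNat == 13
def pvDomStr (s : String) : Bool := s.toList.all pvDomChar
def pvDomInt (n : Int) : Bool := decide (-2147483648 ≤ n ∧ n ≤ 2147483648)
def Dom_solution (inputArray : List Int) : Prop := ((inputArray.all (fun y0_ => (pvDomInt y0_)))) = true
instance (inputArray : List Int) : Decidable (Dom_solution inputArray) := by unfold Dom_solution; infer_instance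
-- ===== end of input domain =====

-- B computes the result by a divide-and-conquer prefix-maximum scan of the shifted values
-- x_i - i plus a separate summing pass, instead of A's sequential cascade on the mutated
-- array (alternative algorithm, same result). A mutates its argument in place; B performs
-- the equivalent mutation (writing every position's final value), and the theorem is about
-- the return value.


-- ===== PORT A =====
-- for i in range(len(inputArray)-1): indices i and i+1 are always in range, so
-- inputArray[i] / inputArray[i+1] are ported with List.getD (the default is never used)
-- and the assignment inputArray[i+1] = tem1 with List.set; state = (number, array).
def solution (inputArray : List Int) : Int :=
  (List.foldl
    (fun (st : Int × List Int) (i : Nat) =>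
      let tem1 := st.2.getD i 0 + 1
      let tem2 := st.2.getD (i + 1) 0
      if tem2 < tem1 then (st.1 + (tem1 - tem2), st.2.set (i + 1) tem1)
      else st)
    (0, inputArray) (List.range (inputArray.length - 1))).1

-- ===== PORT B =====
-- scan(vs): prefix maxima of vs by halving; vs[:mid] / vs[mid:] ported with PySem slices,
-- left[-1] with pyGet? (-1) (left is never empty, so the .getD 0 default is never used).
def scanB (vs : List Int) : List Int :=
  if vs.length ≤ 1 then vs
  else
    let mid := vs.length / 2
    let left := scanB (PySem.List.slice vs none (some (mid : Int)))
    let right := scanB (PySem.List.slice vs (some (mid : Int)) none)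
    let t := (PySem.List.pyGet? left (-1)).getD 0
    left ++ right.map (fun r => if t > r then t else r)
  termination_by vs.length
  decreasing_by
  · simp only [PySem.List.slice_to_natCast, List.length_take]; omega
  · simp only [PySem.List.slice_from_natCast, List.length_drop]; omega

-- the final loop reads p[i] and inputArray[i] for i in range(1, len) — always in range,
-- and the in-place write inputArray[i] = i + p[i] never affects a later read, so the
-- port carries only the total; getD's default is never used.
def solution_alt (inputArray : List Int) : Int :=
  if inputArray = [] then 0
  else
    let p := scanB ((PySem.List.enumerate inputArray 0).map (fun q => q.2 - q.1))
    (List.range' 1 (inputArray.length - 1)).foldl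
      (fun (tot : Int) (i : Nat) => tot + ((i : Int) + p.getD i 0 - inputArray.getD i 0)) 0

-- ===== PRECONDITION & SPEC =====
def Spec_solution (inputArray : List Int) (out : Int) : Prop := out = solution_alt inputArray
instance (inputArray : List Int) (out : Int) : Decidable (Spec_solution inputArray out) := by unfold Spec_solution; infer_instance

-- ===== CLAIM (what is proved, stated in full; the proofs are below) =====
def Claim_equal_solution : Prop := ∀ (inputArray : List Int), Dom_solution inputArray → Spec_solution inputArray (solution inputArray)

-- ===== LEMMAS AND PROOFS =====

-- common reference: total moves for the suffix xs starting at position i with running max m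
def goMoves (i m : Int) : List Int → Int
  | [] => 0
  | x :: xs => let m' := max m (x - i); (i + m' - x) + goMoves (i + 1) m' xs

theorem getD_append_len (l t : List Int) (y : Int) :
    (l ++ y :: t).getD l.length 0 = y := by
  simp [List.getD_eq_getElem?_getD]

theorem getD_append_len_succ (l t : List Int) (y x : Int) :
    (l ++ y :: x :: t).getD (l.length + 1) 0 = x := by
  simp [List.getD_eq_getElem?_getD]

theorem set_append_len_succ (l t : List Int) (y x v : Int) :
    (l ++ y :: x :: t).set (l.length + 1) v = (l ++ [y]) ++ v :: t := by
  induction l with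
  | nil => simp
  | cons a l ih => simp [ih]

theorem solution_key (rest : List Int) : ∀ (pre0 : List Int) (num m : Int),
    (List.foldl
      (fun (st : Int × List Int) (i : Nat) =>
        let tem1 := st.2.getD i 0 + 1
        let tem2 := st.2.getD (i + 1) 0
        if tem2 < tem1 then (st.1 + (tem1 - tem2), st.2.set (i + 1) tem1)
        else st)
      (num, pre0 ++ ((pre0.length : Int) + m) :: rest)
      (List.range' pre0.length rest.length)).1
      = num + goMoves ((pre0.length : Int) + 1) m rest := by
  induction rest with
  | nil => intro pre0 num m; simp [goMoves]
  | cons x rs ih =>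
    intro pre0 num m
    rw [List.length_cons, List.range'_succ, List.foldl_cons]
    simp only [getD_append_len, getD_append_len_succ, set_append_len_succ]
    by_cases h : x < (pre0.length : Int) + m + 1
    · have hm : max m (x - ((pre0.length : Int) + 1)) = m := by
        apply max_eq_left; omega
      rw [if_pos h]
      rw [show ((pre0.length : Int) + m + 1) = ((pre0.length : Int) + 1 + m) by ring]
      have := ih (pre0 ++ [(pre0.length : Int) + m]) (num + ((pre0.length : Int) + 1 + m - x)) m
      simp only [List.length_append, List.length_cons, List.length_nil] at this
      push_cast at this
      rw [this, goMoves]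
      simp only [hm]
      ring
    · have hm : max m (x - ((pre0.length : Int) + 1)) = x - ((pre0.length : Int) + 1) := by
        apply max_eq_right; omega
      rw [if_neg h]
      have harr : pre0 ++ ((pre0.length : Int) + m) :: x :: rs
          = (pre0 ++ [(pre0.length : Int) + m]) ++ (((pre0.length : Int) + 1) + (x - ((pre0.length : Int) + 1))) :: rs := by
        rw [show ((pre0.length : Int) + 1) + (x - ((pre0.length : Int) + 1)) = x by ring]
        simp
      rw [harr]
      have := ih (pre0 ++ [(pre0.length : Int) + m]) num (x - ((pre0.length : Int) + 1))
      simp only [List.length_append, List.length_cons, List.length_nil] at this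
      push_cast at this
      rw [this, goMoves]
      simp only [hm]
      ring

theorem solution_eq_goMoves (a : Int) (xs : List Int) :
    solution (a :: xs) = goMoves 1 a xs := by
  have := solution_key xs [] 0 a
  simp only [List.length_nil, Nat.cast_zero, List.nil_append, zero_add] at this
  unfold solution
  rw [List.length_cons, Nat.add_sub_cancel, List.range_eq_range']
  exact this

-- B-side reference: sequential prefix maxima with seed m
def scanSpec (m : Int) : List Int → List Int
  | [] => []
  | x :: xs => max m x :: scanSpec (max m x) xs

theorem scanSpec_length (xs : List Int) : ∀ m, (scanSpec m xs).length = xs.length := by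
  induction xs with
  | nil => intro m; rfl
  | cons x xs ih => intro m; simp [scanSpec, ih]

theorem scanSpec_map_max (xs : List Int) : ∀ (t m : Int),
    scanSpec (max t m) xs = (scanSpec m xs).map (fun r => max t r) := by
  induction xs with
  | nil => intro t m; rfl
  | cons x xs ih =>
    intro t m
    simp only [scanSpec, List.map_cons, max_assoc]
    rw [ih]

theorem scanSpec_append (ys : List Int) : ∀ (zs : List Int) (m : Int),
    scanSpec m (ys ++ zs) = scanSpec m ys ++ scanSpec ((scanSpec m ys).getLastD m) zs := by
  induction ys with
  | nil => intro zs m; simp [scanSpec]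
  | cons u us ih =>
    intro zs m
    simp only [List.cons_append, scanSpec, List.getLastD_cons]
    rw [ih zs (max m u)]

theorem scanSpec_absorb (m x : Int) (zs : List Int) :
    scanSpec (max m x) (x :: zs) = scanSpec m (x :: zs) := by
  simp [scanSpec]

theorem scanSpec_cons_getLastD (x c : Int) (tk : List Int) :
    (scanSpec x (x :: tk)).getLastD c = (scanSpec x tk).getLastD x := by
  simp only [scanSpec, List.getLastD_cons, max_self]

theorem scanB_cons : ∀ (n : Nat) (x : Int) (xs : List Int), xs.length < n →
    scanB (x :: xs) = scanSpec x (x :: xs) := by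
  intro n
  induction n with
  | zero => intro x xs h; omega
  | succ n ih =>
    intro x xs h
    rw [scanB]
    by_cases h1 : (x :: xs).length ≤ 1
    · have hx : xs = [] := by
        cases xs with
        | nil => rfl
        | cons a b => simp at h1
      subst hx
      simp [scanSpec]
    · rw [if_neg h1]
      simp only [List.length_cons] at h1 ⊢
      have h2 : 2 ≤ xs.length + 1 := by omega
      set mid := (xs.length + 1) / 2 with hmid
      have hm1 : 1 ≤ mid := by omega
      have hm2 : mid ≤ xs.length := by omega
      -- rewrite the two slices
      rw [PySem.List.slice_to_natCast, PySem.List.slice_from_natCast]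
      have htake : (x :: xs).take mid = x :: xs.take (mid - 1) := by
        cases hm : mid with
        | zero => omega
        | succ k => simp
      have hdrop : (x :: xs).drop mid = xs.drop (mid - 1) := by
        cases hm : mid with
        | zero => omega
        | succ k => simp
      rw [htake, hdrop]
      obtain ⟨y, zs, hd⟩ : ∃ y zs, xs.drop (mid - 1) = y :: zs := by
        cases hdd : xs.drop (mid - 1) with
        | nil =>
          have := congrArg List.length hdd
          simp only [List.length_drop, List.length_nil] at this
          omega
        | cons y zs => exact ⟨y, zs, rfl⟩
      rw [hd]
      have hlen2 : xs.length - (mid - 1) = zs.length + 1 := by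
        have := congrArg List.length hd
        simpa using this
      have hleft := ih x (xs.take (mid - 1)) (by simp; omega)
      have hright := ih y zs (by omega)
      rw [hleft, hright]
      -- the last of the left scan
      have hget : (PySem.List.pyGet? (scanSpec x (x :: xs.take (mid - 1))) (-1)).getD 0
          = (scanSpec x (x :: xs.take (mid - 1))).getLastD 0 := by
        rw [PySem.List.pyGet?_neg_one, ← List.getLastD_eq_getLast?]
      rw [hget, scanSpec_cons_getLastD]
      set T := (scanSpec x (xs.take (mid - 1))).getLastD x with hT
      -- the decomposition of the whole list
      have hsplit : x :: xs = (x :: xs.take (mid - 1)) ++ (y :: zs) := by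
        rw [← hd]; simp
      rw [hsplit, scanSpec_append, scanSpec_cons_getLastD, ← hT]
      congr 1
      have hfun : (fun r => if T > r then T else r) = (fun r => max T r) := by
        funext r
        rcases le_or_gt T r with hc | hc
        · rw [if_neg (by omega), max_eq_right hc]
        · rw [if_pos hc, max_eq_left (le_of_lt hc)]
      rw [hfun, ← scanSpec_map_max, scanSpec_absorb]

-- index-fold over a pair of lists equals a direct element-wise recursion
def pairSum (s : Int) : List Int → List Int → Int
  | p :: ps, x :: xs => (s + p - x) + pairSum (s + 1) ps xs
  | _, _ => 0

theorem foldl_idx : ∀ (ps xs prep prex : List Int) (tot : Int),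
    prep.length = prex.length → ps.length = xs.length →
    (List.range' prep.length ps.length).foldl
      (fun (tot : Int) (i : Nat) => tot + ((i : Int) + (prep ++ ps).getD i 0 - (prex ++ xs).getD i 0)) tot
    = tot + pairSum (prep.length : Int) ps xs := by
  intro ps
  induction ps with
  | nil =>
    intro xs prep prex tot hpre hlen
    have : xs = [] := List.eq_nil_of_length_eq_zero (by simp at hlen; omega)
    subst this
    simp [pairSum]
  | cons p ps ih =>
    intro xs prep prex tot hpre hlen
    cases xs with
    | nil => simp at hlen
    | cons x xs =>
      rw [List.length_cons, List.range'_succ, List.foldl_cons]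
      rw [getD_append_len, hpre, getD_append_len, ← hpre]
      have heq1 : prep ++ p :: ps = (prep ++ [p]) ++ ps := by simp
      have heq2 : prex ++ x :: xs = (prex ++ [x]) ++ xs := by simp
      rw [heq1, heq2]
      have hlen' : (prep ++ [p]).length = (prex ++ [x]).length := by simp [hpre]
      have := ih xs (prep ++ [p]) (prex ++ [x])
        (tot + ((prep.length : Int) + p - x)) hlen' (by simpa using hlen)
      simp only [List.length_append, List.length_cons, List.length_nil] at this
      rw [show prep.length + 1 = prep.length + (0 + 1) by omega] at this
      simp only [Nat.zero_add] at this
      rw [this, pairSum]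
      push_cast
      ring

theorem pairSum_scanSpec (xs : List Int) : ∀ (i m : Int),
    pairSum i (scanSpec m ((PySem.List.enumerate xs i).map (fun q => q.2 - q.1))) xs
      = goMoves i m xs := by
  induction xs with
  | nil => intro i m; simp [PySem.List.enumerate_nil, scanSpec, pairSum, goMoves]
  | cons x rs ih =>
    intro i m
    rw [PySem.List.enumerate_cons, List.map_cons]
    simp only [scanSpec, pairSum, goMoves]
    rw [ih (i + 1) (max m (x - i))]

theorem alt_eq_goMoves (a : Int) (xs : List Int) :
    solution_alt (a :: xs) = goMoves 1 a xs := by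
  rw [solution_alt, if_neg (by simp)]
  have hdiffs : (PySem.List.enumerate (a :: xs) 0).map (fun q => q.2 - q.1)
      = a :: (PySem.List.enumerate xs 1).map (fun q => q.2 - q.1) := by
    rw [PySem.List.enumerate_cons, List.map_cons]
    norm_num
  rw [hdiffs]
  set dtail := (PySem.List.enumerate xs 1).map (fun q => q.2 - q.1) with hdt
  have hscan : scanB (a :: dtail) = a :: scanSpec a dtail := by
    rw [scanB_cons (dtail.length + 1) a dtail (by omega)]
    simp [scanSpec]
  rw [hscan]
  have hlen : (scanSpec a dtail).length = xs.length := by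
    rw [scanSpec_length, hdt]
    simp [PySem.List.length_enumerate]
  have := foldl_idx (scanSpec a dtail) xs [a] [a] 0 rfl hlen
  rw [hlen] at this
  simp only [List.length_cons, List.length_nil, Nat.zero_add, Nat.cast_one] at this ⊢
  rw [Nat.add_sub_cancel]
  have hla : a :: scanSpec a dtail = [a] ++ scanSpec a dtail := rfl
  have hlx : a :: xs = [a] ++ xs := rfl
  rw [hla, hlx, this, pairSum_scanSpec xs 1 a]
  ring

-- ===== VERDICT (by name: the statement is the Claim_ definition above) =====
theorem solution_spec : Claim_equal_solution := by
  intro inputArray _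
  unfold Spec_solution
  cases inputArray with
  | nil => rfl
  | cons a xs => rw [solution_eq_goMoves, alt_eq_goMoves]
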